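-- pv_equiv track=rewrite | github.com/Pockern/defect_detection | MIL/data/preprocess.py | get_label_of_functions_by_patches
-- ===== SOURCE A (Python) =====
-- def get_label_of_functions_by_patches(functions_starts, functions_ends, patches_divided_starts):
--     """
--     give label of vulnerablity function (only for code before patched)
--     """
--     functions_label = [0] * len(functions_starts)
--     # for each function
--     for i in range(len(functions_starts)):
--         # for each patch
--         for j in range(len(patches_divided_starts)):
--             # patch[j] close to this func[i]
--             if patches_divided_starts[j] >= functions_starts[i]-5 and patches_divided_starts[j] <= functions_ends[i]+5:
--                 # union patches close to func?
--                 if functions_label[i] == 0: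
--                     functions_label[i] = 1
--
--     return functions_label
-- ===== SOURCE B (Python) =====
-- def _bisect_left(a, x):
--     """Leftmost insertion point of x in sorted list a (hand-written: A's module imports nothing)."""
--     lo, hi = 0, len(a)
--     while lo < hi:
--         mid = (lo + hi) // 2
--         if a[mid] < x:
--             lo = mid + 1
--         else:
--             hi = mid
--     return lo
--
-- def get_label_of_functions_by_patches(functions_starts, functions_ends, patches_divided_starts):
--     sp = sorted(patches_divided_starts)
--     labels = []
--     for s, e in zip(functions_starts, functions_ends):
--         i = _bisect_left(sp, s - 5)
--         labels.append(1 if i < len(sp) and sp[i] <= e + 5 else 0)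
--     return labels
-- ===== Notes on version B (the rewrite author's own statement) =====
-- stated objective: faster
-- what changed: Instead of scanning every patch for every function, B sorts the patch starts once and answers each function's [start-5, end+5] window with a binary search (leftmost patch >= start-5, then one comparison against end+5).
-- outside the precondition, e.g. on get_label_of_functions_by_patches([0, 1], [0], []): A returns [0, 0], B returns [0]
import Mathlib
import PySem

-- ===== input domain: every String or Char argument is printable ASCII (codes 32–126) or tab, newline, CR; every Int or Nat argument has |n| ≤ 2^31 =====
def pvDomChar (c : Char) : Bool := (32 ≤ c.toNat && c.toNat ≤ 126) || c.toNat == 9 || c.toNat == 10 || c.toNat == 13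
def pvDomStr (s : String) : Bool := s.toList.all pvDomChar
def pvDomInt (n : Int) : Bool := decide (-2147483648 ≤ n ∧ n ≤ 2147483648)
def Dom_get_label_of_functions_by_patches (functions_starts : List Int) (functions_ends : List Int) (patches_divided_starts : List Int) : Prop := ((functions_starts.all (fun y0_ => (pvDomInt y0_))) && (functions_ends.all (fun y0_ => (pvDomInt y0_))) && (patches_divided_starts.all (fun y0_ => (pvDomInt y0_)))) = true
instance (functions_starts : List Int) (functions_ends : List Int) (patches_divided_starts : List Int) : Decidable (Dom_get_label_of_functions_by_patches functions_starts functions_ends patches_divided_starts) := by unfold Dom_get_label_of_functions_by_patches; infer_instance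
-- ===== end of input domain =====

-- B replaces A's nested function×patch scan by one sort of the patch starts plus a binary search per function (asymptotically faster).


-- ===== PORT A =====
-- literal transliteration: labels = [0]*F; for i in range(F): for j in range(P): if ps[j] >= fs[i]-5 and ps[j] <= es[i]+5: if labels[i]==0: labels[i]=1
-- (indexing is in range inside Pre_; .getD 0 stands for the in-range subscript)
def get_label_of_functions_by_patches (functions_starts : List Int) (functions_ends : List Int) (patches_divided_starts : List Int) : List Int :=
  (List.range functions_starts.length).foldl (fun labels i =>
    (List.range patches_divided_starts.length).foldl (fun labels j =>
      if patches_divided_starts.getD j 0 ≥ functions_starts.getD i 0 - 5 ∧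
         patches_divided_starts.getD j 0 ≤ functions_ends.getD i 0 + 5 then
        (if labels.getD i 0 = 0 then labels.set i 1 else labels)
      else labels) labels)
    (List.replicate functions_starts.length 0)

-- ===== PORT B =====
-- literal transliteration of Source B: sort patches once, then per function a bisect_left for start-5 and one comparison against end+5
def get_label_of_functions_by_patches_alt (functions_starts : List Int) (functions_ends : List Int) (patches_divided_starts : List Int) : List Int :=
  let sp := PySem.List.sorted patches_divided_starts (fun x => x) false
  (functions_starts.zip functions_ends).map (fun se =>
    let i := PySem.List.bisectLeft sp (se.1 - 5)
    if i < sp.length ∧ sp.getD i 0 ≤ se.2 + 5 then 1 else 0)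

-- ===== PRECONDITION & SPEC =====
-- Pre_ excludes inputs where functions_ends is shorter than functions_starts: there A raises IndexError as
-- soon as some patch reaches the first conjunct for an index past functions_ends, and where it happens to
-- return (e.g. an empty patch list short-circuits the subscript away) that value is an accident of A's
-- per-index loop; B's zip truncates there.
def Pre_get_label_of_functions_by_patches (functions_starts : List Int) (functions_ends : List Int) (patches_divided_starts : List Int) : Prop :=
  functions_starts.length ≤ functions_ends.length
instance (functions_starts : List Int) (functions_ends : List Int) (patches_divided_starts : List Int) : Decidable (Pre_get_label_of_functions_by_patches functions_starts functions_ends patches_divided_starts) := by unfold Pre_get_label_of_functions_by_patches; infer_instance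

def pvWitness_get_label_of_functions_by_patches : List Int × List Int × List Int := ([10, 100], [20, 110], [8, 300])

def Spec_get_label_of_functions_by_patches (functions_starts : List Int) (functions_ends : List Int) (patches_divided_starts : List Int) (out : List Int) : Prop := out = get_label_of_functions_by_patches_alt functions_starts functions_ends patches_divided_starts
instance (functions_starts : List Int) (functions_ends : List Int) (patches_divided_starts : List Int) (out : List Int) : Decidable (Spec_get_label_of_functions_by_patches functions_starts functions_ends patches_divided_starts out) := by unfold Spec_get_label_of_functions_by_patches; infer_instance

-- ===== CLAIM (what is proved, stated in full; the proofs are below) =====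
def Claim_equal_get_label_of_functions_by_patches : Prop := ∀ (functions_starts : List Int) (functions_ends : List Int) (patches_divided_starts : List Int), Dom_get_label_of_functions_by_patches functions_starts functions_ends patches_divided_starts → Pre_get_label_of_functions_by_patches functions_starts functions_ends patches_divided_starts → Spec_get_label_of_functions_by_patches functions_starts functions_ends patches_divided_starts (get_label_of_functions_by_patches functions_starts functions_ends patches_divided_starts)

-- ===== LEMMAS AND PROOFS =====

-- fold over range(len xs) subscripting xs = fold over xs itself
lemma foldl_range_getD {α β : Type} (xs : List α) (d : α) (f : β → α → β) (init : β) :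
    (List.range xs.length).foldl (fun b j => f b (xs.getD j d)) init = xs.foldl f init := by
  induction xs generalizing init with
  | nil => simp
  | cons x t ih =>
    simp only [List.length_cons, List.range_succ_eq_map, List.foldl_cons, List.foldl_map]
    simpa using ih (f init x)

-- A's inner loop over the patches: set index i to 1 once iff it was 0 and some patch hits the window
lemma inner_loop_char (ps : List Int) (lo hi : Int) (i : Nat) :
    ∀ labels : List Int, i < labels.length →
    ps.foldl (fun labels p =>
      if p ≥ lo ∧ p ≤ hi then (if labels.getD i 0 = 0 then labels.set i 1 else labels) else labels) labels
    = if labels.getD i 0 = 0 ∧ ps.any (fun p => decide (lo ≤ p) && decide (p ≤ hi)) then labels.set i 1 else labels := by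
  induction ps with
  | nil => intro labels _; simp
  | cons p t ih =>
    intro labels hlen
    by_cases c0 : labels.getD i 0 = 0
    · by_cases cp : p ≥ lo ∧ p ≤ hi
      · have hset : (labels.set i 1).getD i 0 = 1 := by
          simp [List.getD, hlen]
        simp only [List.foldl_cons, if_pos cp, if_pos c0]
        rw [ih (labels.set i 1) (by simpa using hlen)]
        rw [hset]
        have hany : ((p :: t).any fun p => decide (lo ≤ p) && decide (p ≤ hi)) = true := by
          simp [cp.1, cp.2]
        rw [if_neg (by simp), if_pos ⟨c0, hany⟩]
      · have hhead : (decide (lo ≤ p) && decide (p ≤ hi)) = false := by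
          rcases not_and_or.mp cp with h | h <;> simp [h]
        simp only [List.foldl_cons, if_neg cp]
        rw [ih labels hlen, List.any_cons, hhead, Bool.false_or]
    · have hstep : (if p ≥ lo ∧ p ≤ hi then (if labels.getD i 0 = 0 then labels.set i 1 else labels) else labels) = labels := by
        split_ifs <;> first | exact absurd ‹labels.getD i 0 = 0› c0 | rfl
      simp only [List.foldl_cons, hstep]
      rw [ih labels hlen]
      rw [if_neg (fun h => c0 h.1), if_neg (fun h => c0 h.1)]

-- the window test on the input list, as the claim's common denominator
def hitB (ps : List Int) (lo hi : Int) : Bool := ps.any (fun p => decide (lo ≤ p) && decide (p ≤ hi))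

-- A's whole loop nest computes the per-index window test
lemma portA_char (fs es ps : List Int) :
    get_label_of_functions_by_patches fs es ps
    = (List.range fs.length).map (fun i => if hitB ps (fs.getD i 0 - 5) (es.getD i 0 + 5) then 1 else 0) := by
  unfold get_label_of_functions_by_patches
  have main : ∀ k, k ≤ fs.length →
      (List.range k).foldl (fun labels i =>
        (List.range ps.length).foldl (fun labels j =>
          if ps.getD j 0 ≥ fs.getD i 0 - 5 ∧ ps.getD j 0 ≤ es.getD i 0 + 5 then
            (if labels.getD i 0 = 0 then labels.set i 1 else labels)
          else labels) labels)
        (List.replicate fs.length 0)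
      = (List.range fs.length).map (fun i =>
          if i < k then (if hitB ps (fs.getD i 0 - 5) (es.getD i 0 + 5) then (1:Int) else 0) else 0) := by
    intro k hk
    induction k with
    | zero => simp [List.map_const']
    | succ k ih =>
      have hk' : k ≤ fs.length := Nat.le_of_succ_le hk
      rw [List.range_succ, List.foldl_append, ih hk', List.foldl_cons, List.foldl_nil]
      set L := (List.range fs.length).map (fun i =>
          if i < k then (if hitB ps (fs.getD i 0 - 5) (es.getD i 0 + 5) then (1:Int) else 0) else 0) with hL
      have hLlen : L.length = fs.length := by simp [hL]
      have hklt : k < fs.length := hk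
      have hLk : L.getD k 0 = 0 := by
        simp [hL, List.getD, hklt]
      rw [foldl_range_getD ps 0
        (fun labels p => if p ≥ fs.getD k 0 - 5 ∧ p ≤ es.getD k 0 + 5 then
            (if labels.getD k 0 = 0 then labels.set k 1 else labels) else labels) L]
      rw [inner_loop_char ps (fs.getD k 0 - 5) (es.getD k 0 + 5) k L (by omega)]
      rw [hLk]
      rw [if_congr (show ((0:Int) = 0 ∧ (ps.any fun p => decide (fs.getD k 0 - 5 ≤ p) && decide (p ≤ es.getD k 0 + 5)) = true)
            ↔ (hitB ps (fs.getD k 0 - 5) (es.getD k 0 + 5) = true) by simp [hitB]) rfl rfl]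
      by_cases hhit : hitB ps (fs.getD k 0 - 5) (es.getD k 0 + 5)
      · rw [if_pos hhit]
        apply List.ext_getElem
        · simp [hLlen]
        · intro j hj1 hj2
          have hjn : j < fs.length := by simp [hLlen] at hj1; omega
          simp only [List.getElem_set, List.getElem_map, List.getElem_range]
          by_cases hjk : k = j
          · rw [if_pos hjk, ← hjk, if_pos (by omega : k < k + 1), if_pos hhit]
          · rw [if_neg hjk]
            simp only [hL, List.getElem_map, List.getElem_range]
            rw [if_congr (show (j < k + 1) ↔ (j < k) by omega) rfl rfl]
      · rw [if_neg hhit]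
        apply List.ext_getElem
        · simp [hLlen]
        · intro j hj1 hj2
          simp only [hL, List.getElem_map, List.getElem_range]
          by_cases hjk : j = k
          · rw [hjk, if_neg (by omega : ¬ (k:Nat) < k), if_pos (by omega : k < k + 1), if_neg hhit]
          · rw [if_congr (show (j < k + 1) ↔ (j < k) by omega) rfl rfl]
  rw [main fs.length le_rfl]
  apply List.map_congr_left
  intro i hi
  rw [if_pos (List.mem_range.mp hi)]

-- B's sorted-list binary-search test answers exactly the window test
lemma bisect_window (ps : List Int) (lo hi : Int) :
    (PySem.List.bisectLeft (PySem.List.sorted ps (fun x => x) false) lo < (PySem.List.sorted ps (fun x => x) false).length ∧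
      (PySem.List.sorted ps (fun x => x) false).getD (PySem.List.bisectLeft (PySem.List.sorted ps (fun x => x) false) lo) 0 ≤ hi)
    ↔ hitB ps lo hi = true := by
  set sp := PySem.List.sorted ps (fun x => x) false with hsp
  have hsorted : sp.Pairwise (fun a b => a ≤ b) := by
    simpa using PySem.List.sorted_pairwise ps (fun x => x)
  obtain ⟨hle, hlt, hge⟩ := PySem.List.bisectLeft_spec sp lo hsorted
  set b := PySem.List.bisectLeft sp lo with hb
  simp only [hitB, List.any_eq_true]
  constructor
  · rintro ⟨hblt, hhi⟩
    refine ⟨sp[b], ?_, ?_⟩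
    · exact (PySem.List.mem_sorted ps (fun x => x) false sp[b]).mp (List.getElem_mem hblt)
    · have hge' : lo ≤ sp[b] := hge b hblt le_rfl
      rw [List.getD_eq_getElem sp 0 hblt] at hhi
      simp only [Bool.and_eq_true, decide_eq_true_eq]
      exact ⟨hge', hhi⟩
  · rintro ⟨p, hp, hcond⟩
    simp only [Bool.and_eq_true, decide_eq_true_eq] at hcond
    obtain ⟨hlo, hhi⟩ := hcond
    have hpsp : p ∈ sp := (PySem.List.mem_sorted ps (fun x => x) false p).mpr hp
    obtain ⟨j, hj, hpj⟩ := List.getElem_of_mem hpsp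
    have hbj : b ≤ j := by
      by_contra h
      have := hlt j hj (by omega)
      omega
    have hblt : b < sp.length := lt_of_le_of_lt hbj hj
    have hmono : sp[b] ≤ sp[j] := PySem.List.sorted_id_getElem_mono ps hbj hj
    rw [hpj] at hmono
    refine ⟨hblt, ?_⟩
    rw [List.getD_eq_getElem sp 0 hblt]
    omega

-- ===== VERDICT (by name: the statement is the Claim_ definition above) =====
theorem get_label_of_functions_by_patches_spec : Claim_equal_get_label_of_functions_by_patches := by
  intro fs es ps _ hpre
  unfold Spec_get_label_of_functions_by_patches
  rw [portA_char]
  unfold get_label_of_functions_by_patches_alt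
  have hpre' : fs.length ≤ es.length := hpre
  apply List.ext_getElem
  · simp [Nat.min_eq_left hpre']
  · intro j hj1 hj2
    simp only [List.getElem_map, List.getElem_range, List.getElem_zip]
    have hjf : j < fs.length := by simpa using hj1
    have hje : j < es.length := by omega
    simp only [List.getD_eq_getElem fs 0 hjf, List.getD_eq_getElem es 0 hje]
    exact (if_congr (bisect_window ps (fs[j] - 5) (es[j] + 5)) rfl rfl).symm
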